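-- pv_equiv track=rewrite | github.com/matthinc/gomment | scripts/idx_hierarchy.py | hierarchy_to_idx
-- ===== SOURCE A (Python) =====
-- import math
--
-- def hierarchy_to_idx(counts, md_idx):
--     offset = 0
--     for i in range(2,len(md_idx)+1):
--         offset += math.prod(counts[:i-1])
--
--     to_right = counts[:len(md_idx)]
--     for i in range(len(to_right)):
--         to_right[i] = math.prod(to_right[i+1:])
--
--     relative_idx = 0
--     for i in range(len(md_idx)):
--         relative_idx = relative_idx + to_right[i] * md_idx[i]
--
--     return offset + relative_idx
-- ===== SOURCE B (Python) =====
-- def hierarchy_to_idx(counts, md_idx):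
--     m = len(md_idx)
--     total = 0
--     suffix = 1
--     for i in reversed(range(m)):
--         total += md_idx[i] * suffix
--         suffix *= counts[i]
--     prefix = 1
--     for i in range(m - 1):
--         prefix *= counts[i]
--         total += prefix
--     return total
-- ===== Notes on version B (the rewrite author's own statement) =====
-- stated objective: faster
-- what changed: Replaced the three passes with repeated O(n) prefix/suffix product recomputations (math.prod over slices inside loops) by a single backward pass maintaining a running suffix product (Horner-style) plus a forward running prefix product for the offset.
import Mathlib
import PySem

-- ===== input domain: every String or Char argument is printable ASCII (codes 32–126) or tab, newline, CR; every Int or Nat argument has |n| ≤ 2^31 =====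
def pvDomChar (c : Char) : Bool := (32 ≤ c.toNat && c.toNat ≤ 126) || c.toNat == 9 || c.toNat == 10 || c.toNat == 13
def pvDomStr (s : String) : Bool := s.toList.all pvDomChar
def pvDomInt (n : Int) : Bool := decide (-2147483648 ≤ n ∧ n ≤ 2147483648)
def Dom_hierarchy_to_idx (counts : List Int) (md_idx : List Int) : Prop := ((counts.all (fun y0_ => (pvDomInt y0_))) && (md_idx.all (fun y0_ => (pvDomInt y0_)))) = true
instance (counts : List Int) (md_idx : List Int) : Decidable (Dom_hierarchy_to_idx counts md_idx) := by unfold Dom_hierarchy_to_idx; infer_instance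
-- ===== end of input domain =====

-- B replaces A's repeated slice-product passes by one backward suffix-product pass
-- plus one forward prefix-product pass (O(n) instead of O(n^2)); equivalence is on
-- the return value (A also mutates none of its arguments observably: it slices a copy).

-- ===== PORT A =====
-- literal transliteration of A; pyGetD's default 0 is unreachable under Pre_
-- (Python raises IndexError exactly when len(md_idx) > len(counts), excluded by Pre_).
def hierarchy_to_idx (counts : List Int) (md_idx : List Int) : Int :=
  let offset : Int :=
    (PySem.List.pyRange 2 ((md_idx.length : Int) + 1) 1).foldl
      (fun off i => off + (PySem.List.slice counts none (some (i - 1))).prod) 0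
  let to_right0 : List Int := PySem.List.slice counts none (some (md_idx.length : Int))
  let to_right : List Int :=
    (PySem.List.pyRange 0 (to_right0.length : Int) 1).foldl
      (fun tr i => tr.set i.toNat (PySem.List.slice tr (some (i + 1)) none).prod) to_right0
  let relative_idx : Int :=
    (PySem.List.pyRange 0 (md_idx.length : Int) 1).foldl
      (fun r i => r + (PySem.List.pyGetD to_right i 0) * (PySem.List.pyGetD md_idx i 0)) 0
  offset + relative_idx

-- ===== PORT B =====
-- literal transliteration of Source B: backward pass (total, suffix), then forward pass (prefix, total).
def hierarchy_to_idx_alt (counts : List Int) (md_idx : List Int) : Int :=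
  let m := md_idx.length
  let ts : Int × Int :=
    ((List.range m).reverse).foldl
      (fun (p : Int × Int) (i : Nat) =>
        (p.1 + (PySem.List.pyGetD md_idx (i : Int) 0) * p.2,
         p.2 * (PySem.List.pyGetD counts (i : Int) 0))) (0, 1)
  let pt : Int × Int :=
    (List.range (m - 1)).foldl
      (fun (p : Int × Int) (i : Nat) =>
        (p.1 * (PySem.List.pyGetD counts (i : Int) 0),
         p.2 + p.1 * (PySem.List.pyGetD counts (i : Int) 0))) (1, ts.1)
  pt.2

-- ===== PRECONDITION & SPEC =====
-- Pre_ excludes exactly the inputs where Python A raises IndexError (md_idx longer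
-- than counts: to_right[i] goes out of range); B raises there too (counts[i]).
def Pre_hierarchy_to_idx (counts : List Int) (md_idx : List Int) : Prop :=
  md_idx.length ≤ counts.length
instance (counts : List Int) (md_idx : List Int) : Decidable (Pre_hierarchy_to_idx counts md_idx) := by
  unfold Pre_hierarchy_to_idx; infer_instance

def pvWitness_hierarchy_to_idx : List Int × List Int := ([2, 3, 4], [1, 2, 0])

def Spec_hierarchy_to_idx (counts : List Int) (md_idx : List Int) (out : Int) : Prop := out = hierarchy_to_idx_alt counts md_idx
instance (counts : List Int) (md_idx : List Int) (out : Int) : Decidable (Spec_hierarchy_to_idx counts md_idx out) := by unfold Spec_hierarchy_to_idx; infer_instance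

-- ===== CLAIM (what is proved, stated in full; the proofs are below) =====
def Claim_equal_hierarchy_to_idx : Prop := ∀ (counts : List Int) (md_idx : List Int), Dom_hierarchy_to_idx counts md_idx → Pre_hierarchy_to_idx counts md_idx → Spec_hierarchy_to_idx counts md_idx (hierarchy_to_idx counts md_idx)

-- ===== LEMMAS AND PROOFS =====

-- prefix product P m = counts[0]*…*counts[m-1], Horner value R m, offset sum OFF m
def pvP (counts : List Int) : Nat → Int
  | 0 => 1
  | m + 1 => pvP counts m * counts.getD m 0

def pvR (counts md : List Int) : Nat → Int
  | 0 => 0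
  | m + 1 => counts.getD m 0 * pvR counts md m + md.getD m 0

def pvOFF (counts : List Int) : Nat → Int
  | 0 => 0
  | m + 1 => pvOFF counts m + pvP counts (m + 1)

theorem pv_take_succ_getD (counts : List Int) (m : Nat) (h : m < counts.length) :
    counts.take (m + 1) = counts.take m ++ [counts.getD m 0] := by
  rw [List.take_add_one, List.getElem?_eq_getElem h]
  simp [List.getD, List.getElem?_eq_getElem h]

theorem pv_take_prod (counts : List Int) : ∀ m, m ≤ counts.length →
    (counts.take m).prod = pvP counts m := by
  intro m
  induction m with
  | zero => simp [pvP]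
  | succ k ih =>
    intro h
    rw [pv_take_succ_getD counts k (by omega), List.prod_append, ih (by omega)]
    simp [pvP]

-- ---------- A's offset loop ----------
theorem pv_offA (counts : List Int) : ∀ j : Nat, j ≤ counts.length →
    (PySem.List.pyRange 2 ((j : Int) + 2) 1).foldl
      (fun off i => off + (PySem.List.slice counts none (some (i - 1))).prod) 0
    = pvOFF counts j := by
  intro j
  induction j with
  | zero =>
    intro _
    have h0 : (((0 : Nat) : Int) + 2) = 2 := by norm_num
    rw [h0, PySem.List.pyRange_one_eq_nil (a := 2) (b := 2) le_rfl]
    simp [pvOFF]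
  | succ k ih =>
    intro h
    have hsplit : PySem.List.pyRange 2 (((k + 1 : Nat) : Int) + 2) 1
        = PySem.List.pyRange 2 ((k : Int) + 2) 1 ++ [(k : Int) + 2] := by
      have := PySem.List.pyRange_one_succ_right (a := 2) (b := (k : Int) + 2) (by omega)
      push_cast
      push_cast at this
      convert this using 2
    rw [hsplit, List.foldl_append, ih (by omega)]
    simp only [List.foldl_cons, List.foldl_nil]
    have h2 : ((k : Int) + 2) - 1 = ((k + 1 : Nat) : Int) := by push_cast; ring
    rw [h2, PySem.List.slice_to_natCast, pv_take_prod counts (k + 1) h]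
    simp [pvOFF]

-- ---------- A's to_right mutation loop ----------
theorem pv_tr (cs : List Int) : ∀ (k j : Nat) (tr : List Int),
    j + k = cs.length → tr.length = cs.length → tr.drop j = cs.drop j →
    (PySem.List.pyRange (j : Int) ((cs.length : Int)) 1).foldl
      (fun tr i => tr.set i.toNat (PySem.List.slice tr (some (i + 1)) none).prod) tr
    = tr.take j ++ (List.range' j k).map (fun i => (cs.drop (i + 1)).prod) := by
  intro k
  induction k with
  | zero =>
    intro j tr hjk hlen _
    rw [PySem.List.pyRange_one_eq_nil (a := (j : Int)) (b := ((cs.length : Int))) (by omega)]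
    simp [List.take_of_length_le (by omega : tr.length ≤ j)]
  | succ k ih =>
    intro j tr hjk hlen hdrop
    rw [PySem.List.pyRange_one_cons (by omega : (j : Int) < (cs.length : Int))]
    simp only [List.foldl_cons]
    have hj : j < cs.length := by omega
    have hfrom : PySem.List.slice tr (some ((j : Int) + 1)) none = tr.drop (j + 1) := by
      have hc : ((j : Int) + 1) = ((j + 1 : Nat) : Int) := by push_cast; ring
      rw [hc, PySem.List.slice_from_natCast]
    have hdrop1 : tr.drop (j + 1) = cs.drop (j + 1) := by
      have := congrArg (List.drop 1) hdrop
      simpa [List.drop_drop, Nat.add_comm] using this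
    have hstep : tr.set ((j : Int)).toNat (PySem.List.slice tr (some ((j : Int) + 1)) none).prod
        = tr.set j ((cs.drop (j + 1)).prod) := by
      rw [hfrom, hdrop1]; simp
    rw [hstep]
    have hcast : ((j : Int) + 1) = (((j + 1 : Nat)) : Int) := by push_cast; ring
    rw [hcast, ih (j + 1) (tr.set j ((cs.drop (j + 1)).prod)) (by omega) (by simpa using hlen)
      (by rw [List.drop_set]; simp [hdrop1])]
    have htr : tr.set j ((cs.drop (j + 1)).prod)
        = tr.take j ++ ((cs.drop (j + 1)).prod) :: tr.drop (j + 1) := by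
      rw [List.set_eq_take_append_cons_drop, if_pos (by omega : j < tr.length)]
    have hlj : (tr.take j).length = j := by simp; omega
    have htake : (tr.take j ++ ((cs.drop (j + 1)).prod) :: tr.drop (j + 1)).take (j + 1)
        = tr.take j ++ [(cs.drop (j + 1)).prod] := by
      rw [List.take_append, List.take_take, hlj]
      simp
    rw [htr, htake, List.range'_succ]
    simp

-- ---------- A's relative loop as a sum, then Horner ----------
theorem pv_SA_eq_R (counts md : List Int) : ∀ m, m ≤ counts.length →
    ((List.range m).map
      (fun i => ((counts.take m).drop (i + 1)).prod * md.getD i 0)).sum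
    = pvR counts md m := by
  intro m
  induction m with
  | zero => simp [pvR]
  | succ k ih =>
    intro h
    have hlast : ((counts.take (k + 1)).drop (k + 1)).prod = 1 := by
      have hd : (counts.take (k + 1)).length ≤ k + 1 := by simp
      rw [List.drop_of_length_le hd]
      simp
    have hcongr : (List.range k).map
        (fun i => ((counts.take (k + 1)).drop (i + 1)).prod * md.getD i 0)
        = (List.range k).map
        (fun i => (((counts.take k).drop (i + 1)).prod * md.getD i 0) * counts.getD k 0) := by
      apply List.map_congr_left
      intro i hi
      have hik : i < k := List.mem_range.mp hi
      rw [pv_take_succ_getD counts k (by omega),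
        List.drop_append_of_le_length (by simp [List.length_take]; omega)]
      rw [List.prod_append]
      simp; ring
    rw [List.range_succ, List.map_append, List.sum_append, hcongr,
      List.sum_map_mul_right, ih (by omega)]
    simp [pvR]
    ring

theorem pv_relA (counts md : List Int) (m : Nat) (h : m ≤ counts.length) :
    (PySem.List.pyRange 0 ((m : Int)) 1).foldl
      (fun r i => r +
        (PySem.List.pyGetD
          ((List.range m).map (fun i => ((counts.take m).drop (i + 1)).prod)) i 0)
        * (PySem.List.pyGetD md i 0)) 0
    = pvR counts md m := by
  rw [PySem.List.pyRange_one]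
  simp only [Int.sub_zero, Int.toNat_natCast, List.foldl_map]
  rw [PySem.List.foldl_add]
  have hmap : (List.range m).map
      (fun (k : Nat) => (PySem.List.pyGetD
          ((List.range m).map (fun i => ((counts.take m).drop (i + 1)).prod)) ((0 : Int) + (k : Int)) 0)
        * (PySem.List.pyGetD md ((0 : Int) + (k : Int)) 0))
      = (List.range m).map
      (fun i => ((counts.take m).drop (i + 1)).prod * md.getD i 0) := by
    apply List.map_congr_left
    intro k hk
    have hkm : k < m := List.mem_range.mp hk
    have h0 : ((0 : Int) + (k : Int)) = ((k : Nat) : Int) := by ring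
    rw [h0, PySem.List.pyGetD_natCast, PySem.List.pyGetD_natCast,
      PySem.List.getD_map_range _ m k 0 hkm]
  rw [hmap]
  simpa using pv_SA_eq_R counts md m h

-- ---------- B's two loops ----------
theorem pv_B1 (counts md : List Int) : ∀ (m : Nat) (t s : Int),
    ((List.range m).reverse).foldl
      (fun (p : Int × Int) (i : Nat) =>
        (p.1 + (PySem.List.pyGetD md (i : Int) 0) * p.2,
         p.2 * (PySem.List.pyGetD counts (i : Int) 0))) (t, s)
    = (t + s * pvR counts md m, s * pvP counts m) := by
  intro m
  induction m with
  | zero => intro t s; simp [pvR, pvP]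
  | succ k ih =>
    intro t s
    rw [List.range_succ, List.reverse_append]
    simp only [List.reverse_singleton, List.singleton_append, List.foldl_cons]
    rw [ih]
    simp [PySem.List.pyGetD_natCast, pvR, pvP, Prod.ext_iff]
    constructor <;> ring

theorem pv_B2 (counts : List Int) : ∀ (q : Nat) (t : Int),
    (List.range q).foldl
      (fun (p : Int × Int) (i : Nat) =>
        (p.1 * (PySem.List.pyGetD counts (i : Int) 0),
         p.2 + p.1 * (PySem.List.pyGetD counts (i : Int) 0))) (1, t)
    = (pvP counts q, t + pvOFF counts q) := by
  intro q
  induction q with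
  | zero => intro t; simp [pvP, pvOFF]
  | succ k ih =>
    intro t
    rw [List.range_succ, List.foldl_append, ih]
    simp [PySem.List.pyGetD_natCast, pvP, pvOFF]
    ring

theorem pv_B (counts md : List Int) (m : Nat) (hm : m = md.length) :
    hierarchy_to_idx_alt counts md = pvR counts md m + pvOFF counts (m - 1) := by
  unfold hierarchy_to_idx_alt
  simp only [← hm]
  rw [pv_B1 counts md m 0 1]
  simp only [Int.zero_add, Int.one_mul]
  rw [pv_B2 counts (m - 1) (pvR counts md m)]

theorem pv_offA' (counts : List Int) (m : Nat) (h : m - 1 ≤ counts.length) :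
    (PySem.List.pyRange 2 ((m : Int) + 1) 1).foldl
      (fun off i => off + (PySem.List.slice counts none (some (i - 1))).prod) 0
    = pvOFF counts (m - 1) := by
  cases m with
  | zero =>
    have h0 : (((0 : Nat) : Int) + 1) = 1 := by norm_num
    rw [h0, PySem.List.pyRange_one_eq_nil (a := 2) (b := 1) (by norm_num)]
    simp [pvOFF]
  | succ k =>
    have h1 : (((k + 1 : Nat)) : Int) + 1 = ((k : Int)) + 2 := by push_cast; ring
    rw [h1]
    simpa using pv_offA counts k (by omega)

-- ===== VERDICT (by name: the statement is the Claim_ definition above) =====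
theorem hierarchy_to_idx_spec : Claim_equal_hierarchy_to_idx := by
  intro counts md _ hpre
  unfold Pre_hierarchy_to_idx at hpre
  unfold Spec_hierarchy_to_idx
  unfold hierarchy_to_idx
  simp only [PySem.List.slice_to_natCast counts md.length,
    pv_offA' counts md.length (by omega)]
  have htr := pv_tr (counts.take md.length) md.length 0 (counts.take md.length)
    (by simp; omega) rfl rfl
  have htr' : (PySem.List.pyRange 0 (((counts.take md.length).length : Int)) 1).foldl
      (fun tr i => tr.set i.toNat (PySem.List.slice tr (some (i + 1)) none).prod)
      (counts.take md.length)
      = (List.range md.length).map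
        (fun i => ((counts.take md.length).drop (i + 1)).prod) := by
    simpa [List.range_eq_range'] using htr
  simp only [htr', pv_relA counts md md.length hpre]
  rw [pv_B counts md md.length rfl]
  ring
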